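-- pv_equiv track=rewrite | github.com/MLGHerobrine/PowerTab | src/index.py | sort_teams
-- ===== SOURCE A (Python) =====
-- def sort_teams(teams):
-- 	output = {} # Dictionary of teams, sorted by wins. Ex: output['1'] = ['Speaker1-Speaker2', 'Speaker1-Speaker2', 'Speaker1-Speaker2']
-- 	for k, v in teams.items():
-- 		if not v['wins'] in output:
-- 			output[v['wins']] = [k]
-- 		else: # Better to replace with a else if and throw error if elif doesn't work
-- 			output[v['wins']].append(k)
-- 	return output
-- ===== SOURCE B (Python) =====
-- def sort_teams(teams):
--     order = list(dict.fromkeys(v['wins'] for v in teams.values()))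
--     return {w: [k for k, v in teams.items() if v['wins'] == w] for w in order}
-- ===== Notes on version B (the rewrite author's own statement) =====
-- stated objective: alternative
-- what changed: B replaces A's single pass with incremental dict membership/append by a two-phase scheme: ordered dedup of the win counts, then one bucket comprehension per distinct win count.
import Mathlib
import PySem

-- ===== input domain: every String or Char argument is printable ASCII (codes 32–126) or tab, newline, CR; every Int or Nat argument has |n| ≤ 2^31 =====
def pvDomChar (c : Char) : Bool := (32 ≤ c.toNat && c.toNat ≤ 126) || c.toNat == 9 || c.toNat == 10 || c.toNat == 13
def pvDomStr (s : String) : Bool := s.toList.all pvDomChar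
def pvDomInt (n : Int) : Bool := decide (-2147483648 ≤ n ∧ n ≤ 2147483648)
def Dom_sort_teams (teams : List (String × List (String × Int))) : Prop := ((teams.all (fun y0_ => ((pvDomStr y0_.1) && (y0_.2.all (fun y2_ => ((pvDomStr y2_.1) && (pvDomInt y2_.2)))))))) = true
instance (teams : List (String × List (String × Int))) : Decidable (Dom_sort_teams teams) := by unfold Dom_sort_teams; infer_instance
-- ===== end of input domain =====

-- B groups by a two-phase scheme (ordered dedup of win counts, then one bucket scan per
-- distinct count) instead of A's single pass with incremental dict membership/append;
-- Pre_ excludes inputs where some team value lacks a 'wins' key (A raises KeyError there).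


-- ===== PORT A =====
-- v['wins'] is ported as getD … 0; Pre_ guarantees the key is present, so the default is never read.
def sort_teams (teams : List (String × List (String × Int))) : List (Int × List String) :=
  (teams.foldl (fun output kv =>
      let w := (PySem.Dict.mk kv.2).getD "wins" 0
      if output.contains w = false then output.insert w [kv.1]
      else output.modify w [] (fun l => l ++ [kv.1]))
    PySem.Dict.empty).items

-- ===== PORT B =====
def pvWin (kv : String × List (String × Int)) : Int := (PySem.Dict.mk kv.2).getD "wins" 0

def sort_teams_alt (teams : List (String × List (String × Int))) : List (Int × List String) :=
  (PySem.List.dedup (teams.map pvWin)).map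
    (fun w => (w, (teams.filter (fun kv => pvWin kv == w)).map (·.1)))

-- ===== PRECONDITION & SPEC =====
-- Pre_ excludes exactly the inputs where some team value has no 'wins' key: A raises KeyError there.
def Pre_sort_teams (teams : List (String × List (String × Int))) : Prop :=
  ∀ kv ∈ teams, (PySem.Dict.mk kv.2).contains "wins" = true
instance (teams : List (String × List (String × Int))) : Decidable (Pre_sort_teams teams) := by unfold Pre_sort_teams; infer_instance

def pvWitness_sort_teams : (List (String × List (String × Int))) :=
  [("a-b", [("wins", 2)]), ("c-d", [("wins", 1)]), ("e-f", [("wins", 2)])]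

def Spec_sort_teams (teams : List (String × List (String × Int))) (out : List (Int × List String)) : Prop := out = sort_teams_alt teams
instance (teams : List (String × List (String × Int))) (out : List (Int × List String)) : Decidable (Spec_sort_teams teams out) := by unfold Spec_sort_teams; infer_instance

-- ===== CLAIM (what is proved, stated in full; the proofs are below) =====
def Claim_equal_sort_teams : Prop := ∀ (teams : List (String × List (String × Int))), Dom_sort_teams teams → Pre_sort_teams teams → Spec_sort_teams teams (sort_teams teams)

-- ===== LEMMAS AND PROOFS =====

-- A's two branches are both Dict.modify with default []
lemma stepA_eq_modify (d : PySem.Dict Int (List String)) (w : Int) (k : String) :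
    (if d.contains w = false then d.insert w [k]
     else d.modify w [] (fun l => l ++ [k])) = d.modify w [] (fun l => l ++ [k]) := by
  split_ifs with h
  · apply PySem.Dict.ext
    rw [PySem.Dict.items_insert_of_not_contains _ _ h]
    simp [PySem.Dict.modify, PySem.Dict.getD_of_not_contains, PySem.Dict.items_insert_of_not_contains, h]
  · rfl

lemma items_eq_map_keys (d : PySem.Dict Int (List String)) (h : d.keys.Nodup) :
    d.items = d.keys.map (fun k => (k, d.getD k [])) := by
  simp only [PySem.Dict.keys, List.map_map]
  conv_lhs => rw [← List.map_id d.items]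
  apply List.map_congr_left
  intro p hp
  have := PySem.Dict.getD_of_mem_items (d := d) (k := p.1) (v := p.2) (d0 := ([] : List String))
    (by simpa using hp) h
  simp [Function.comp, this]

-- ===== VERDICT =====
theorem sort_teams_spec : Claim_equal_sort_teams := by
  intro teams _ _
  unfold Spec_sort_teams sort_teams sort_teams_alt
  have hstep : teams.foldl (fun output kv =>
      let w := (PySem.Dict.mk kv.2).getD "wins" 0
      if output.contains w = false then output.insert w [kv.1]
      else output.modify w [] (fun l => l ++ [kv.1])) PySem.Dict.empty
      = teams.foldl (fun d kv => d.modify (pvWin kv) [] (fun l => l ++ [kv.1])) PySem.Dict.empty := by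
    apply PySem.List.foldl_congr_mem
    intro acc kv _
    exact stepA_eq_modify acc (pvWin kv) kv.1
  rw [hstep]
  set D := teams.foldl (fun d kv => d.modify (pvWin kv) [] (fun l => l ++ [kv.1])) PySem.Dict.empty with hD
  have hkeys : D.keys = PySem.List.dedup (teams.map pvWin) := by
    rw [hD, PySem.Dict.keys_foldl_modify_key]
    simp [PySem.Set.update, PySem.Set.ofList_eq_foldl]
  have hnodup : D.keys.Nodup := by
    rw [hkeys]; exact PySem.List.nodup_dedup _
  have hgetD : ∀ w : Int, D.getD w [] = (teams.filter (fun kv => pvWin kv == w)).map (·.1) := by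
    intro w
    have h := PySem.Dict.getD_foldl_modify_append
      (teams.map (fun kv : String × List (String × Int) => (pvWin kv, kv.1)))
      PySem.Dict.empty w
    simp only [List.foldl_map] at h
    rw [hD, h]
    simp [List.filter_map, Function.comp_def]
  rw [items_eq_map_keys D hnodup, hkeys]
  apply List.map_congr_left
  intro w _
  rw [hgetD w]
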